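-- pv_equiv track=rewrite | github.com/RaidOuahioune/isdbi-agent | enhancement.py | _group_discussion_by_round
-- ===== SOURCE A (Python) =====
-- from typing import Dict, Any, List, Optional, Callable
--
-- def _group_discussion_by_round(history: List[Dict]) -> List[tuple]:
--     """Group discussion entries by round number."""
--     rounds = {}
--     for entry in history:
--         round_num = entry.get("round", 0)
--         if round_num not in rounds:
--             rounds[round_num] = []
--         rounds[round_num].append(entry)
--
--     return sorted(rounds.items())
-- ===== SOURCE B (Python) =====
-- def _group_discussion_by_round(history):
--     """Group discussion entries by round number."""
--     keys = sorted({entry.get("round", 0) for entry in history})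
--     return [
--         (k, [entry for entry in history if entry.get("round", 0) == k])
--         for k in keys
--     ]
-- ===== Notes on version B (the rewrite author's own statement) =====
-- stated objective: simpler
-- what changed: B replaces A's dict-of-buckets accumulator with a two-step comprehension: collect the distinct round numbers into a sorted list, then emit one (round, filtered-history) pair per round by filtering the original list.
import Mathlib
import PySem

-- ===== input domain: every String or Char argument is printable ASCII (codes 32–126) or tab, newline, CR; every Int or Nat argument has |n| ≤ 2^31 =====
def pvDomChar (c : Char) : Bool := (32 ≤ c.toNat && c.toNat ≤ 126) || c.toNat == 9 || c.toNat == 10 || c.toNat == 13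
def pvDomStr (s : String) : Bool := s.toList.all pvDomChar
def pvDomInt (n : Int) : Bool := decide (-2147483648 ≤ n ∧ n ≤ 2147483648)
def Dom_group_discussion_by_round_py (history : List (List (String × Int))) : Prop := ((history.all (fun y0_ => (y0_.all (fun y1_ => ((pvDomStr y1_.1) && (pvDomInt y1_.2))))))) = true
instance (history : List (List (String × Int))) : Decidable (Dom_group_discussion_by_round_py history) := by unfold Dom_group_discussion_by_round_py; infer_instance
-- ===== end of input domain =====

-- B groups by collecting the sorted distinct round keys and filtering the history per key,
-- instead of A's dict-of-buckets accumulator; objective: simpler (not faster).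


-- ===== PORT A =====
-- entry.get("round", 0): first match in the entry (a dict ported as an association list)
def pvRound (entry : List (String × Int)) : Int :=
  (PySem.Dict.mk entry).getD "round" 0

-- Python's sorted(rounds.items()) compares (key, value) tuples lexicographically; the dict's
-- keys are distinct, so it orders exactly by the Int key — ported as sorted with key p.1.
def group_discussion_by_round_py (history : List (List (String × Int))) : List (Int × (List (List (String × Int)))) :=
  let rounds : PySem.Dict Int (List (List (String × Int))) :=
    history.foldl (fun d entry =>
      let r := pvRound entry
      let d := if d.contains r then d else d.insert r []
      d.modify r [] (fun l => l ++ [entry])) PySem.Dict.empty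
  PySem.List.sorted rounds.items (fun p => p.1)

-- ===== PORT B =====
def group_discussion_by_round_py_alt (history : List (List (String × Int))) : List (Int × (List (List (String × Int)))) :=
  let keys := PySem.List.sorted (PySem.Set.ofList (history.map pvRound)) (fun k => k)
  keys.map (fun k => (k, history.filter (fun entry => pvRound entry == k)))

-- ===== PRECONDITION & SPEC =====
def Spec_group_discussion_by_round_py (history : List (List (String × Int))) (out : List (Int × (List (List (String × Int))))) : Prop := out = group_discussion_by_round_py_alt history
instance (history : List (List (String × Int))) (out : List (Int × (List (List (String × Int))))) : Decidable (Spec_group_discussion_by_round_py history out) := by unfold Spec_group_discussion_by_round_py; infer_instance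

-- ===== CLAIM (what is proved, stated in full; the proofs are below) =====
def Claim_equal_group_discussion_by_round_py : Prop := ∀ (history : List (List (String × Int))), Dom_group_discussion_by_round_py history → Spec_group_discussion_by_round_py history (group_discussion_by_round_py history)

-- ===== LEMMAS AND PROOFS =====

-- A's loop body ("if new key: insert empty bucket, then append") is exactly Dict.modify.
theorem pvStep_eq (d : PySem.Dict Int (List (List (String × Int)))) (entry : List (String × Int)) :
    (let r := pvRound entry;
     let d' := if d.contains r then d else d.insert r []
     d'.modify r [] (fun l => l ++ [entry]))
    = d.modify (pvRound entry) [] (fun l => l ++ [entry]) := by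
  by_cases h : d.contains (pvRound entry)
  · simp [h]
  · simp only [Bool.not_eq_true] at h
    simp only [h, if_neg Bool.false_ne_true, PySem.Dict.modify,
      PySem.Dict.getD_insert_self, PySem.Dict.insert_insert_self,
      PySem.Dict.getD_of_not_contains d _ h]

-- A's finished dict, characterised: its items are the distinct round keys in first-occurrence
-- order, each paired with the filter of the original history on that key.
theorem pvDict_items (history : List (List (String × Int))) :
    (history.foldl (fun d entry =>
        let r := pvRound entry
        let d := if d.contains r then d else d.insert r []
        d.modify r [] (fun l => l ++ [entry])) (PySem.Dict.empty : PySem.Dict Int (List (List (String × Int))))).items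
    = (PySem.Set.ofList (history.map pvRound)).map
        (fun k => (k, history.filter (fun entry => pvRound entry == k))) := by
  have hfun : (fun (d : PySem.Dict Int (List (List (String × Int)))) entry =>
      let r := pvRound entry
      let d := if d.contains r then d else d.insert r []
      d.modify r [] (fun l => l ++ [entry]))
      = fun d entry => d.modify (pvRound entry) [] (fun l => l ++ [entry]) := by
    funext d entry; exact pvStep_eq d entry
  rw [hfun]
  set D := history.foldl (fun d entry => d.modify (pvRound entry) [] (fun l => l ++ [entry]))
      (PySem.Dict.empty : PySem.Dict Int (List (List (String × Int)))) with hD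
  have hnd : D.keys.Nodup := by
    rw [hD]
    exact PySem.Dict.nodup_keys_foldl_modify_key history pvRound [] (fun _ e l => l ++ [e]) _
      (by simp)
  have hkeys : D.keys = PySem.Set.ofList (history.map pvRound) := by
    rw [hD, PySem.Dict.keys_foldl_modify_key history pvRound [] (fun _ e l => l ++ [e]),
      PySem.Set.ofList_eq_foldl]
    rfl
  rw [PySem.Dict.items_eq_map_keys D hnd [], hkeys]
  refine List.map_congr_left (fun k _ => ?_)
  have hfold : D = (history.map (fun e => (pvRound e, e))).foldl
      (fun d p => d.modify p.1 [] (fun l => l ++ [p.2])) PySem.Dict.empty := by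
    rw [hD, List.foldl_map]
  have := PySem.Dict.getD_foldl_modify_append (history.map (fun e => (pvRound e, e)))
      (PySem.Dict.empty : PySem.Dict Int (List (List (String × Int)))) k
  rw [← hfold] at this
  rw [this, PySem.Dict.getD_empty, List.nil_append, List.filter_map, List.map_map]
  simp [Function.comp_def]

-- ===== VERDICT (by name: the statement is the Claim_ definition above) =====
theorem group_discussion_by_round_py_spec : Claim_equal_group_discussion_by_round_py := by
  intro history _
  show group_discussion_by_round_py history = group_discussion_by_round_py_alt history
  show PySem.List.sorted
      (history.foldl (fun d entry =>
        let r := pvRound entry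
        let d := if d.contains r then d else d.insert r []
        d.modify r [] (fun l => l ++ [entry])) (PySem.Dict.empty : PySem.Dict Int (List (List (String × Int))))).items
      (fun p => p.1)
    = (PySem.List.sorted (PySem.Set.ofList (history.map pvRound)) (fun k => k)).map
        (fun k => (k, history.filter (fun entry => pvRound entry == k)))
  rw [pvDict_items]
  refine PySem.List.sorted_eq_of_perm_of_pairwise_lt _ _ _ ?_ ?_
  · exact List.Perm.map _ (PySem.List.sorted_perm _ _ _)
  · have := PySem.List.sorted_ofList_pairwise_lt (history.map pvRound)
    exact (List.pairwise_map).mpr this
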